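-- pv_equiv track=rewrite | github.com/yangyangzhiyi/badou-jingpin | 105-李改丽/week4/wordsplit.py | cut_method1_pre
-- ===== SOURCE A (Python) =====
-- def cut_method1_pre(string, word_dict_pre):
--     words = []
--     while string != '':
--         n = 1
--         word = string[:n]
--         while word in word_dict_pre:
--             if word_dict_pre[word] == 1:
--                 words.append(word)
--                 string = string[len(word):]
--                 word = ""
--                 break
--             else:
--                 n += 1
--                 if n > len(string):
--                     break
--                 else:
--                     word = string[:n]
--
--         if word == "":
--             continue
--         else:
--             word = word[:1]
--             words.append(word)
--             string = string[len(word):]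
--
--     return words
-- ===== SOURCE B (Python) =====
-- def cut_method1_pre(string, word_dict_pre):
--     # Build a trie once; node = [present, is_word, children].
--     root = [False, False, {}]
--     for w, v in word_dict_pre.items():
--         node = root
--         for ch in w:
--             node = node[2].setdefault(ch, [False, False, {}])
--         if not node[0]:
--             node[0] = True
--             node[1] = (v == 1)
--     words = []
--     rest = string
--     while rest:
--         node = root
--         j = 0
--         emitted = False
--         while j < len(rest):
--             child = node[2].get(rest[j])
--             if child is None or not child[0]:
--                 break
--             j += 1
--             if child[1]:
--                 words.append(rest[:j])
--                 rest = rest[j:]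
--                 emitted = True
--                 break
--             node = child
--         if not emitted:
--             words.append(rest[:1])
--             rest = rest[1:]
--     return words
-- ===== Notes on version B (the rewrite author's own statement) =====
-- stated objective: alternative
-- what changed: B builds a trie (nested char-keyed dicts with present/is_word flags) from the dictionary once and segments by descending it character by character, instead of A's repeated prefix slicing with whole-string dict membership tests at every step.
import Mathlib
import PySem

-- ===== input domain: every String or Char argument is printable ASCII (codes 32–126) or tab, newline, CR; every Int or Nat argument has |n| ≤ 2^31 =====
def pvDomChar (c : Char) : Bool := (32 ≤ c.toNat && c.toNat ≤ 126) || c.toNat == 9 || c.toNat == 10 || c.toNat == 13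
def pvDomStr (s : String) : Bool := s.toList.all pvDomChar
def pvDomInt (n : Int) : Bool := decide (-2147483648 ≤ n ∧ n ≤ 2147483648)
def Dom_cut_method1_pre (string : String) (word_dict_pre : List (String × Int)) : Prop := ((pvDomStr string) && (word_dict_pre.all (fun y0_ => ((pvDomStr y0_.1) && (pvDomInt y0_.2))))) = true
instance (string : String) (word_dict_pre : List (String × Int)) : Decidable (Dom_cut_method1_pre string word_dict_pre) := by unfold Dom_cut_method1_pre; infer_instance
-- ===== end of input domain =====

-- B re-implements A's greedy shortest-match segmentation with a trie built once from the
-- dictionary and descended char-by-char, instead of A's repeated prefix slices probed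
-- against the dict; return values proved equal on all inputs.

-- ===== PORT A =====
-- inner 'while word in word_dict_pre' loop of A; strings handled as their code-point lists,
-- dict lookups via PySem.Dict (first-match / overwrite semantics of a Python dict).
-- 'none' = the loop ended without a value-1 match (word left nonempty, its first char is u's first char);
-- 'some w' = the loop matched w (value 1) and broke with word = "".
def cutA_inner (d : PySem.Dict String Int) (u : List Char) (n : Nat) (word : List Char) : Option (List Char) :=
  match d.get? (String.ofList word) with
  | some v =>
      if v == 1 then some word
      else if u.length < n + 1 then none
      else cutA_inner d u (n + 1) (PySem.List.slice u none (some ((n : Int) + 1)))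
  | none => none
  termination_by u.length + 1 - n

-- outer 'while string != ""' loop of A, with fuel making the while-loop total
-- (the equivalence below holds for every fuel value, so no adequacy argument is needed).
def cutA_loop (d : PySem.Dict String Int) : Nat → List Char → List String → List String
  | 0, _, words => words
  | fuel + 1, u, words =>
      if u = [] then words
      else
        match cutA_inner d u 1 (PySem.List.slice u none (some 1)) with
        | some w => cutA_loop d fuel (PySem.List.slice u (some (w.length : Int)) none) (words ++ [String.ofList w])
        | none =>
            cutA_loop d fuel (PySem.List.slice u (some 1) none)
              (words ++ [String.ofList (PySem.List.slice u none (some 1))])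

def cut_method1_pre (string : String) (word_dict_pre : List (String × Int)) : List String :=
  cutA_loop (PySem.Dict.ofList word_dict_pre) (string.toList.length + 1) string.toList []

-- ===== PORT B =====
-- trie node [present, is_word, children]; children an explicit assoc structure (Python: char-keyed dict)
mutual
inductive PvTrie : Type where
  | node : Bool → Bool → PvChildren → PvTrie
inductive PvChildren : Type where
  | nil : PvChildren
  | cons : Char → PvTrie → PvChildren → PvChildren
end


def PvChildren.find? : PvChildren → Char → Option PvTrie
  | .nil, _ => none
  | .cons c t rest, x => if c = x then some t else PvChildren.find? rest x

-- replace the first binding of c, else append (Python dict setdefault order)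
def PvChildren.set : PvChildren → Char → PvTrie → PvChildren
  | .nil, c, t => .cons c t .nil
  | .cons c' t' rest, c, t => if c' = c then .cons c' t rest else .cons c' t' (PvChildren.set rest c t)

def PvTrie.present : PvTrie → Bool | .node p _ _ => p
def PvTrie.isword : PvTrie → Bool | .node _ w _ => w
def PvTrie.children : PvTrie → PvChildren | .node _ _ ch => ch

-- insert one key along its char path (B's build loop body): walk/create children,
-- mark the terminal present (is_word = flag) only if not already present
def PvTrie.ins : PvTrie → List Char → Bool → PvTrie
  | .node p w ch, [], f => if p then .node p w ch else .node true f ch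
  | .node p w ch, c :: cs, f =>
      let child := match ch.find? c with
        | some t => t
        | none => .node false false .nil
      .node p w (ch.set c (child.ins cs f))

def pvBuild (items : List (String × Int)) : PvTrie :=
  items.foldl (fun r kv => r.ins kv.1.toList (kv.2 == 1)) (.node false false .nil)

-- B's inner scan: descend the trie; some j = emit j chars, none = single-char fallback
def cutB_inner (t : PvTrie) : List Char → Option Nat
  | [] => none
  | c :: cs =>
      match t.children.find? c with
      | none => none
      | some child =>
          if child.present = false then none
          else if child.isword then some 1
          else (cutB_inner child cs).map (· + 1)

def cutB_loop (root : PvTrie) : Nat → List Char → List String → List String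
  | 0, _, words => words
  | fuel + 1, rest, words =>
      if rest = [] then words
      else
        match cutB_inner root rest with
        | some j =>
            cutB_loop root fuel (PySem.List.slice rest (some (j : Int)) none)
              (words ++ [String.ofList (PySem.List.slice rest none (some (j : Int)))])
        | none =>
            cutB_loop root fuel (PySem.List.slice rest (some 1) none)
              (words ++ [String.ofList (PySem.List.slice rest none (some 1))])

def cut_method1_pre_alt (string : String) (word_dict_pre : List (String × Int)) : List String :=
  cutB_loop (pvBuild (PySem.Dict.ofList word_dict_pre).items) (string.toList.length + 1) string.toList []

-- ===== PRECONDITION & SPEC =====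
def Spec_cut_method1_pre (string : String) (word_dict_pre : List (String × Int)) (out : List String) : Prop := out = cut_method1_pre_alt string word_dict_pre
instance (string : String) (word_dict_pre : List (String × Int)) (out : List String) : Decidable (Spec_cut_method1_pre string word_dict_pre out) := by unfold Spec_cut_method1_pre; infer_instance

-- ===== CLAIM (what is proved, stated in full; the proofs are below) =====
def Claim_equal_cut_method1_pre : Prop := ∀ (string : String) (word_dict_pre : List (String × Int)), Dom_cut_method1_pre string word_dict_pre → Spec_cut_method1_pre string word_dict_pre (cut_method1_pre string word_dict_pre)

-- ===== LEMMAS AND PROOFS =====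

-- ghost step function: both inner loops compute it (some m = shortest value-1 prefix length, scanning from n)
def stepG (d : PySem.Dict String Int) (u : List Char) (n : Nat) : Option Nat :=
  if u.length < n then none
  else
    match d.get? (String.ofList (u.take n)) with
    | none => none
    | some v => if v == 1 then some n else stepG d u (n + 1)
  termination_by u.length + 1 - n

theorem stepG_bounds (d : PySem.Dict String Int) (u : List Char) :
    ∀ n m, stepG d u n = some m → n ≤ m ∧ m ≤ u.length := by
  intro n
  induction n using stepG.induct d u with
  | case1 n hlt => intro m hm; rw [stepG] at hm; simp [hlt] at hm
  | case2 n hlt hget => intro m hm; rw [stepG] at hm; simp [hlt, hget] at hm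
  | case3 n hlt v hget hv =>
      intro m hm; rw [stepG] at hm; simp [hlt, hget, hv] at hm
      omega
  | case4 n hlt v hget hv ih =>
      intro m hm; rw [stepG] at hm; simp [hlt, hget, hv] at hm
      have := ih m hm; omega

theorem cutA_inner_eq_stepG (d : PySem.Dict String Int) (u : List Char) :
    ∀ n, 1 ≤ n → n ≤ u.length →
      cutA_inner d u n (u.take n) = (stepG d u n).map u.take := by
  suffices H : ∀ k n, 1 ≤ n → n ≤ u.length → u.length - n ≤ k →
      cutA_inner d u n (u.take n) = (stepG d u n).map u.take by
    intro n h1 h2; exact H u.length n h1 h2 (by omega)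
  intro k
  induction k with
  | zero =>
      intro n h1 h2 hk
      have hn : u.length = n := by omega
      rw [cutA_inner, stepG]
      have hlt : ¬ u.length < n := by omega
      simp only [if_neg hlt]
      cases hget : d.get? (String.ofList (u.take n)) with
      | none => simp
      | some v =>
          by_cases hv : v == 1
          · simp [hv]
          · have hb : u.length < n + 1 := by omega
            rw [stepG]
            simp [hv, hb]
  | succ k ih =>
      intro n h1 h2 hk
      rw [cutA_inner, stepG]
      have hlt : ¬ u.length < n := by omega
      simp only [if_neg hlt]
      cases hget : d.get? (String.ofList (u.take n)) with
      | none => simp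
      | some v =>
          by_cases hv : v == 1
          · simp [hv]
          · by_cases hb : u.length < n + 1
            · rw [stepG]
              simp [hv, hb]
            · have hsl : PySem.List.slice u none (some ((n : Int) + 1)) = u.take (n + 1) := by
                have : ((n : Int) + 1) = ((n + 1 : Nat) : Int) := by push_cast; ring
                rw [this, PySem.List.slice_to_natCast]
              simp only [hv, hb, if_false, hsl]
              exact ih (n + 1) (by omega) (by omega) (by omega)

-- trie path lemmas
def pvPathNode? : PvTrie → List Char → Option PvTrie
  | t, [] => some t
  | t, c :: cs =>
      match t.children.find? c with
      | some u => pvPathNode? u cs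
      | none => none

def pvPresentAt (t : PvTrie) (p : List Char) : Bool :=
  match pvPathNode? t p with
  | some u => u.present
  | none => false

def pvIswordAt (t : PvTrie) (p : List Char) : Bool :=
  match pvPathNode? t p with
  | some u => u.isword
  | none => false

theorem find?_set_self (ch : PvChildren) (c : Char) (t : PvTrie) :
    (ch.set c t).find? c = some t := by
  match ch with
  | .nil => simp [PvChildren.set, PvChildren.find?]
  | .cons c' t' rest =>
      by_cases h : c' = c
      · simp [PvChildren.set, PvChildren.find?, h]
      · simp [PvChildren.set, PvChildren.find?, h, find?_set_self rest c t]

theorem find?_set_ne (ch : PvChildren) (c c' : Char) (t : PvTrie) (h : c' ≠ c) :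
    (ch.set c t).find? c' = ch.find? c' := by
  match ch with
  | .nil => simp [PvChildren.set, PvChildren.find?, Ne.symm h]
  | .cons c'' t'' rest =>
      by_cases h2 : c'' = c
      · have hne : c'' ≠ c' := by rw [h2]; exact Ne.symm h
        simp [PvChildren.set, PvChildren.find?, h2, hne, Ne.symm h]
      · have hset : PvChildren.set (.cons c'' t'' rest) c t
            = .cons c'' t'' (rest.set c t) := by simp [PvChildren.set, h2]
        rw [hset]
        by_cases h3 : c'' = c'
        · simp [PvChildren.find?, h3]
        · simp [PvChildren.find?, h3, find?_set_ne rest c c' t h]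


theorem pathNode?_cons (pr iw : Bool) (ch : PvChildren) (c : Char) (ps : List Char) :
    pvPathNode? (.node pr iw ch) (c :: ps) =
      (match ch.find? c with | some u => pvPathNode? u ps | none => none) := rfl

theorem presentAt_nil_path (pr iw : Bool) (ch : PvChildren) :
    pvPresentAt (.node pr iw ch) [] = pr := rfl

theorem iswordAt_nil_path (pr iw : Bool) (ch : PvChildren) :
    pvIswordAt (.node pr iw ch) [] = iw := rfl

theorem presentAt_cons_path (pr iw : Bool) (ch : PvChildren) (c : Char) (ps : List Char) :
    pvPresentAt (.node pr iw ch) (c :: ps) =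
      (match ch.find? c with | some u => pvPresentAt u ps | none => false) := by
  unfold pvPresentAt
  rw [pathNode?_cons]
  cases h : ch.find? c <;> simp [h]

theorem iswordAt_cons_path (pr iw : Bool) (ch : PvChildren) (c : Char) (ps : List Char) :
    pvIswordAt (.node pr iw ch) (c :: ps) =
      (match ch.find? c with | some u => pvIswordAt u ps | none => false) := by
  unfold pvIswordAt
  rw [pathNode?_cons]
  cases h : ch.find? c <;> simp [h]

theorem presentAt_empty (ps : List Char) :
    pvPresentAt (.node false false .nil) ps = false := by
  cases ps with
  | nil => rfl
  | cons c ps => simp [presentAt_cons_path, PvChildren.find?]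

theorem iswordAt_empty (ps : List Char) :
    pvIswordAt (.node false false .nil) ps = false := by
  cases ps with
  | nil => rfl
  | cons c ps => simp [iswordAt_cons_path, PvChildren.find?]

theorem presentAt_ins (w : List Char) : ∀ (t : PvTrie) (p : List Char) (f : Bool),
    pvPresentAt (t.ins w f) p = (pvPresentAt t p || decide (p = w)) := by
  induction w with
  | nil =>
      intro t p f
      obtain ⟨pr, iw, ch⟩ := t
      cases p with
      | nil =>
          cases pr <;> simp [PvTrie.ins, presentAt_nil_path]
      | cons c ps =>
          cases pr <;>
            simp [PvTrie.ins, presentAt_cons_path] <;>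
            cases ch.find? c <;> simp
  | cons c cs ih =>
      intro t p f
      obtain ⟨pr, iw, ch⟩ := t
      cases p with
      | nil => simp [PvTrie.ins, presentAt_nil_path]
      | cons c' ps =>
          by_cases hc : c' = c
          · subst hc
            rw [PvTrie.ins]
            simp only [presentAt_cons_path, find?_set_self, ih]
            cases hf : ch.find? c' with
            | some u => simp
            | none => simp [presentAt_empty]
          · rw [PvTrie.ins]
            simp only [presentAt_cons_path, find?_set_ne _ _ _ _ hc]
            have : (c' :: ps = c :: cs) = False := by simp [hc]
            simp [this]

theorem iswordAt_ins (w : List Char) : ∀ (t : PvTrie) (p : List Char) (f : Bool),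
    pvIswordAt (t.ins w f) p =
      (if p = w ∧ pvPresentAt t p = false then f else pvIswordAt t p) := by
  induction w with
  | nil =>
      intro t p f
      obtain ⟨pr, iw, ch⟩ := t
      cases p with
      | nil =>
          cases pr <;> simp [PvTrie.ins, iswordAt_nil_path, presentAt_nil_path]
      | cons c ps =>
          cases pr <;>
            simp [PvTrie.ins, iswordAt_cons_path]
  | cons c cs ih =>
      intro t p f
      obtain ⟨pr, iw, ch⟩ := t
      cases p with
      | nil => simp [PvTrie.ins, iswordAt_nil_path]
      | cons c' ps =>
          by_cases hc : c' = c
          · subst hc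
            rw [PvTrie.ins]
            simp only [iswordAt_cons_path, find?_set_self, ih,
              presentAt_cons_path]
            cases hf : ch.find? c' with
            | some u => simp
            | none => simp [presentAt_empty, iswordAt_empty]
          · rw [PvTrie.ins]
            simp only [iswordAt_cons_path, find?_set_ne _ _ _ _ hc]
            have : (c' :: ps = c :: cs) = False := by simp [hc]
            simp [this]

theorem presentAt_foldl (l : List (String × Int)) : ∀ (t : PvTrie) (p : List Char),
    pvPresentAt (l.foldl (fun r kv => r.ins kv.1.toList (kv.2 == 1)) t) p
      = (pvPresentAt t p || l.any (fun kv => decide (kv.1.toList = p))) := by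
  induction l with
  | nil => intro t p; simp
  | cons kv rest ih =>
      intro t p
      simp only [List.foldl_cons, List.any_cons]
      rw [ih, presentAt_ins]
      by_cases h : kv.1.toList = p
      · simp [h]
      · simp [h, Ne.symm h, Bool.or_assoc]

theorem iswordAt_foldl (l : List (String × Int)) : ∀ (t : PvTrie) (p : List Char),
    pvIswordAt (l.foldl (fun r kv => r.ins kv.1.toList (kv.2 == 1)) t) p
      = (if pvPresentAt t p = true then pvIswordAt t p
         else match l.find? (fun kv => decide (kv.1.toList = p)) with
              | some kv => (kv.2 == 1)
              | none => pvIswordAt t p) := by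
  induction l with
  | nil =>
      intro t p
      simp only [List.foldl_nil, List.find?]
      split <;> rfl
  | cons kv rest ih =>
      intro t p
      simp only [List.foldl_cons]
      rw [ih, presentAt_ins, iswordAt_ins]
      by_cases hk : kv.1.toList = p
      · subst hk
        by_cases hp : pvPresentAt t kv.1.toList = true
        · simp [hp, List.find?]
        · simp [hp, List.find?]
      · have hd : (decide (kv.1.toList = p)) = false := by simp [hk]
        have hpw : ¬ (p = kv.1.toList ∧ pvPresentAt t p = false) := by
          intro h'; exact hk h'.1.symm
        by_cases hp : pvPresentAt t p = true
        · simp [hp, hpw, List.find?, hd]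
        · simp only [List.find?, hd, hp, Ne.symm hk]
          simp only [hp, Bool.false_eq_true, if_false]
          cases rest.find? (fun kv => decide (kv.1.toList = p)) <;> simp [hpw]

theorem presentAt_build (l : List (String × Int)) (p : List Char) :
    pvPresentAt (pvBuild l) p = l.any (fun kv => decide (kv.1.toList = p)) := by
  unfold pvBuild
  rw [presentAt_foldl, presentAt_empty]
  simp

theorem iswordAt_build (l : List (String × Int)) (p : List Char) :
    pvIswordAt (pvBuild l) p =
      (match l.find? (fun kv => decide (kv.1.toList = p)) with
       | some kv => (kv.2 == 1)
       | none => false) := by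
  unfold pvBuild
  rw [iswordAt_foldl, presentAt_empty]
  simp only [Bool.false_eq_true, if_false]
  cases l.find? (fun kv => decide (kv.1.toList = p)) <;> simp [iswordAt_empty]

theorem get?_eq_find? (d : PySem.Dict String Int) (k : String) :
    d.get? k = (d.items.find? (fun kv => kv.1 == k)).map (·.2) := by
  obtain ⟨l⟩ := d
  induction l with
  | nil => rfl
  | cons kv rest ih =>
      obtain ⟨k0, v0⟩ := kv
      by_cases h : k0 == k
      · simp [PySem.Dict.get?_mk_cons, h, List.find?]
      · simpa [PySem.Dict.get?_mk_cons, h, List.find?] using ih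

theorem pathNode?_snoc (p : List Char) : ∀ (t : PvTrie) (c : Char),
    pvPathNode? t (p ++ [c]) = (pvPathNode? t p).bind (fun u => u.children.find? c) := by
  induction p with
  | nil =>
      intro t c; simp [pvPathNode?]
      cases h : t.children.find? c <;> simp [pvPathNode?]
  | cons c0 ps ih =>
      intro t c
      simp only [List.cons_append, pvPathNode?]
      cases h : t.children.find? c0 <;> simp [ih]

theorem beq_ofList_eq_decide (s : String) (q : List Char) :
    (s == String.ofList q) = decide (s.toList = q) := by
  by_cases h : s.toList = q
  · have h2 : s = String.ofList q := by rw [← h]; simp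
    simp [h2, h]
  · have h2 : s ≠ String.ofList q := by
      intro h3; apply h; rw [h3]; simp
    simp [h2, h]

theorem find?_items_ofList (d : PySem.Dict String Int) (q : List Char) :
    d.items.find? (fun kv => kv.1 == String.ofList q)
      = d.items.find? (fun kv => decide (kv.1.toList = q)) := by
  have : (fun kv : String × Int => kv.1 == String.ofList q)
      = (fun kv : String × Int => decide (kv.1.toList = q)) :=
    funext fun kv => beq_ofList_eq_decide kv.1 q
  rw [this]

theorem find?_none_of_not_present (d : PySem.Dict String Int) (q : List Char)
    (h : pvPresentAt (pvBuild d.items) q = false) :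
    d.items.find? (fun kv => decide (kv.1.toList = q)) = none := by
  rw [presentAt_build] at h
  rw [List.find?_eq_none]
  intro x hx
  have := (List.any_eq_false.mp h) x hx
  simpa using this

theorem cutB_inner_eq_stepG (d : PySem.Dict String Int) (u : List Char) :
    ∀ (cs p : List Char) (t : PvTrie), p ++ cs = u →
      pvPathNode? (pvBuild d.items) p = some t →
      (cutB_inner t cs).map (p.length + ·) = stepG d u (p.length + 1) := by
  intro cs
  induction cs with
  | nil =>
      intro p t hu hT
      simp only [List.append_nil] at hu
      subst hu
      rw [stepG]
      have : p.length < p.length + 1 := by omega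
      simp [cutB_inner, this]
  | cons c cs' ih =>
      intro p t hu hT
      have hlen : u.length = p.length + 1 + cs'.length := by
        rw [← hu]; simp; omega
      rw [stepG]
      have hguard : ¬ u.length < p.length + 1 := by omega
      simp only [if_neg hguard]
      have htake : u.take (p.length + 1) = p ++ [c] := by
        rw [← hu, List.take_append]
        simp
      have hget : d.get? (String.ofList (u.take (p.length + 1)))
          = (d.items.find? (fun kv => decide (kv.1.toList = p ++ [c]))).map (·.2) := by
        rw [htake, get?_eq_find?, find?_items_ofList]
      have hfind : pvPathNode? (pvBuild d.items) (p ++ [c]) = t.children.find? c := by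
        rw [pathNode?_snoc, hT]; rfl
      cases hc : t.children.find? c with
      | none =>
          have hnp : pvPresentAt (pvBuild d.items) (p ++ [c]) = false := by
            unfold pvPresentAt; rw [hfind, hc]
          have hnone := find?_none_of_not_present d (p ++ [c]) hnp
          rw [cutB_inner]
          simp [hc, hget, hnone]
      | some child =>
          have hpn : pvPathNode? (pvBuild d.items) (p ++ [c]) = some child := by
            rw [hfind]; exact hc
          have hpres : pvPresentAt (pvBuild d.items) (p ++ [c]) = child.present := by
            unfold pvPresentAt; rw [hpn]
          have hisw : pvIswordAt (pvBuild d.items) (p ++ [c]) = child.isword := by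
            unfold pvIswordAt; rw [hpn]
          by_cases hprb : child.present = true
          · have hany : d.items.any (fun kv => decide (kv.1.toList = p ++ [c])) = true := by
              rw [← presentAt_build, hpres]; exact hprb
            obtain ⟨kv, hkv⟩ : ∃ kv,
                d.items.find? (fun kv => decide (kv.1.toList = p ++ [c])) = some kv := by
              cases hf : d.items.find? (fun kv => decide (kv.1.toList = p ++ [c])) with
              | none =>
                  exfalso
                  obtain ⟨x, hx, hpx⟩ := List.any_eq_true.mp hany
                  have := (List.find?_eq_none.mp hf) x hx
                  exact this hpx
              | some kv => exact ⟨kv, rfl⟩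
            have hiw : child.isword = (kv.2 == 1) := by
              rw [← hisw, iswordAt_build, hkv]
            rw [cutB_inner]
            simp only [hc, hprb, Bool.true_eq_false, if_false, hget, hkv, Option.map_some]
            by_cases hw : child.isword = true
            · have h1 : (kv.2 == 1) = true := by rw [← hiw]; exact hw
              simp [hw, h1]
            · have h1 : (kv.2 == 1) = false := by rw [← hiw]; simpa using hw
              have hih := ih (p ++ [c]) child (by rw [← hu]; simp) hpn
              simp only [List.length_append, List.length_cons, List.length_nil,
                Nat.zero_add] at hih
              simp only [hw, Bool.false_eq_true, if_false, h1]
              rw [← hih, Option.map_map]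
              congr 1
              funext j
              simp; omega
          · have hnp : pvPresentAt (pvBuild d.items) (p ++ [c]) = false := by
              rw [hpres]; simpa using hprb
            have hnone := find?_none_of_not_present d (p ++ [c]) hnp
            rw [cutB_inner]
            have hpf : child.present = false := by simpa using hprb
            simp [hc, hpf, hget, hnone]

theorem loops_eq (d : PySem.Dict String Int) :
    ∀ (fuel : Nat) (u : List Char) (words : List String),
      cutA_loop d fuel u words = cutB_loop (pvBuild d.items) fuel u words := by
  intro fuel
  induction fuel with
  | zero => intro u words; rfl
  | succ fuel ih =>
      intro u words
      rw [cutA_loop, cutB_loop]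
      by_cases hu : u = []
      · simp [hu]
      · simp only [if_neg hu]
        have hlen : 1 ≤ u.length := by
          cases u with
          | nil => exact absurd rfl hu
          | cons c cs => simp
        have hone : PySem.List.slice u none (some 1) = u.take 1 := by
          have h1 : (1 : Int) = ((1 : Nat) : Int) := rfl
          rw [h1, PySem.List.slice_to_natCast]
        have hA : cutA_inner d u 1 (PySem.List.slice u none (some 1))
            = (stepG d u 1).map u.take := by
          rw [hone]; exact cutA_inner_eq_stepG d u 1 le_rfl hlen
        have hB : cutB_inner (pvBuild d.items) u = stepG d u 1 := by
          have h0 := cutB_inner_eq_stepG d u u [] (pvBuild d.items) rfl rfl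
          simpa using h0
        rw [hA, hB]
        cases hs : stepG d u 1 with
        | none => exact ih _ _
        | some m =>
            obtain ⟨hm1, hm2⟩ := stepG_bounds d u 1 m hs
            simp only [Option.map_some]
            have hwlen : (u.take m).length = m := by simp; omega
            have hsl : PySem.List.slice u none (some ((m : Nat) : Int)) = u.take m := by
              rw [PySem.List.slice_to_natCast]
            rw [hwlen, hsl]
            exact ih _ _

-- ===== VERDICT (by name: the statement is the Claim_ definition above) =====
theorem cut_method1_pre_spec : Claim_equal_cut_method1_pre := by
  intro s l _
  unfold Spec_cut_method1_pre cut_method1_pre cut_method1_pre_alt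
  exact loops_eq _ _ _ _
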